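-- pv_equiv track=rewrite | github.com/AfidAzwad/problemsolving-in-Python-nd-Go | String transformation/stringtransform.py | transformSentence
-- ===== SOURCE A (Python) =====
-- def transformSentence(sentence):
--     sentence.strip()
--     result = ''   #empty string
--     index = 0
--
--     for i in sentence:
--         if(index==0):
--             result+= i
--             index+=1
--         elif(i == ' '):
--             result += i
--             index+=1
--         else:
--             y = sentence[index-1]
--             if(y==' '): # 1st letter of a word will be unchanged
--                 result+= i
--                 index+=1
--             elif(y.lower() < i.lower()): # if next letter is greater than previous one
--                 result += i.upper()
--                 index+=1
--             elif(y.lower()>i.lower()):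
--                 result += i.lower()
--                 index+=1
--             else:
--                 result+= i
--                 index+=1
--     return result
-- ===== SOURCE B (Python) =====
-- def transformSentence(sentence):
--     def tr(prev, c):
--         p, q = prev.lower(), c.lower()
--         if p < q:
--             return c.upper()
--         if p > q:
--             return c.lower()
--         return c
--
--     words = sentence.split(' ')
--     return ' '.join(w[:1] + ''.join(tr(p, c) for p, c in zip(w, w[1:]))
--                     for w in words)
-- ===== Notes on version B (the rewrite author's own statement) =====
-- stated objective: simpler
-- what changed: B splits the sentence at space characters and transforms each word independently from its own characters (first char kept, each later char compared with its original predecessor via zip), then rejoins the words with a space, replacing A's single stateful scan that indexes back into the whole string with a manually maintained counter.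
import Mathlib
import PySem

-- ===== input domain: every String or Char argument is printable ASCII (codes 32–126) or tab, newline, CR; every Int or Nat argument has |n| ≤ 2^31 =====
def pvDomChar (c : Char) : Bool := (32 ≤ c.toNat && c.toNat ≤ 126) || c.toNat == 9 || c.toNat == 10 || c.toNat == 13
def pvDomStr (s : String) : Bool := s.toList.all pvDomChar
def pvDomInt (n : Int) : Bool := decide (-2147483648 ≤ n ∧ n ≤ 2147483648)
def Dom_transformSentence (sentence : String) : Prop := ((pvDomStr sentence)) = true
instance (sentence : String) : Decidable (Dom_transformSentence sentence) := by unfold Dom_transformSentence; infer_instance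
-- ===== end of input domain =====

-- B rebuilds the sentence word by word (split at spaces, transform each word from its own
-- characters, rejoin) instead of A's single indexed scan over the whole string; objective: simpler.

-- ===== PORT A =====
-- A's loop body: state is (result, index); `full` is the whole character list, looked up at
-- index-1 exactly as Python's sentence[index-1] (that index is always in range, so pyGetD is exact).
def tsStepA (full : List Char) (st : List Char × Int) (i : Char) : List Char × Int :=
  if st.2 = 0 then (st.1 ++ [i], st.2 + 1)
  else if i = ' ' then (st.1 ++ [i], st.2 + 1)
  else
    let y := PySem.List.pyGetD full (st.2 - 1) ' '
    if y = ' ' then (st.1 ++ [i], st.2 + 1)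
    else if PySem.Chars.lowerChar y < PySem.Chars.lowerChar i then
      (st.1 ++ [PySem.Chars.upperChar i], st.2 + 1)
    else if PySem.Chars.lowerChar i < PySem.Chars.lowerChar y then
      (st.1 ++ [PySem.Chars.lowerChar i], st.2 + 1)
    else (st.1 ++ [i], st.2 + 1)

def transformSentence (sentence : String) : String :=
  let _ := PySem.Str.strip sentence   -- Python's discarded `sentence.strip()`
  String.ofList ((sentence.toList.foldl (tsStepA sentence.toList) ([], 0)).1)

-- ===== PORT B =====
-- tr(prev, c) of Source B
def tsAltChar (prev c : Char) : Char :=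
  if PySem.Chars.lowerChar prev < PySem.Chars.lowerChar c then PySem.Chars.upperChar c
  else if PySem.Chars.lowerChar c < PySem.Chars.lowerChar prev then PySem.Chars.lowerChar c
  else c

-- w[:1] + ''.join(tr(p, c) for p, c in zip(w, w[1:]))
def tsAltWord (w : List Char) : List Char :=
  w.take 1 ++ List.zipWith tsAltChar w (w.drop 1)

-- sentence.split(' ') on a 1-char separator is List.splitOn; ' '.join is [' '].intercalate
def transformSentence_alt (sentence : String) : String :=
  String.ofList ([' '].intercalate ((sentence.toList.splitOn ' ').map tsAltWord))

-- ===== PRECONDITION & SPEC =====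
def Spec_transformSentence (sentence : String) (out : String) : Prop := out = transformSentence_alt sentence
instance (sentence : String) (out : String) : Decidable (Spec_transformSentence sentence out) := by unfold Spec_transformSentence; infer_instance

-- ===== CLAIM (what is proved, stated in full; the proofs are below) =====
def Claim_equal_transformSentence : Prop := ∀ (sentence : String), Dom_transformSentence sentence → Spec_transformSentence sentence (transformSentence sentence)

-- ===== LEMMAS AND PROOFS =====

-- the per-character rule A implements: output char given original predecessor p
def tsG (p c : Char) : Char :=
  if c = ' ' then c else if p = ' ' then c else tsAltChar p c

-- A's result after the first character: each char transformed from its original predecessor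
def tsMapPrev (p : Char) : List Char → List Char
  | [] => []
  | c :: cs => tsG p c :: tsMapPrev c cs

lemma tsG_space_left (c : Char) : tsG ' ' c = c := by
  unfold tsG; split_ifs <;> simp_all

lemma tsG_space_right (q : Char) : tsG q ' ' = ' ' := by
  unfold tsG; split_ifs <;> simp_all

lemma getD_append_cons (pre l : List Char) (p d : Char) :
    (pre ++ p :: l).getD pre.length d = p := by
  simp [List.getD]

lemma tsLoopA (suf : List Char) : ∀ (pre res : List Char) (p : Char),
    ((suf.foldl (tsStepA (pre ++ p :: suf)) (res, ((pre.length : Int) + 1))).1)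
      = res ++ tsMapPrev p suf := by
  induction suf with
  | nil => intro pre res p; simp [tsMapPrev]
  | cons c suf ih =>
    intro pre res p
    have hidx : ((pre.length : Int) + 1) ≠ 0 := by omega
    have hy : PySem.List.pyGetD (pre ++ p :: c :: suf) ((pre.length : Int) + 1 - 1) ' ' = p := by
      have h1 : ((pre.length : Int) + 1 - 1) = ((pre.length : Nat) : Int) := by omega
      rw [h1, PySem.List.pyGetD_natCast, getD_append_cons]
    have step : tsStepA (pre ++ p :: c :: suf) (res, ((pre.length : Int) + 1)) c
        = (res ++ [tsG p c], ((pre.length : Int) + 1) + 1) := by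
      by_cases hc : c = ' '
      · simp [tsStepA, hidx, hc, tsG]
      · by_cases hp : p = ' '
        · simp [tsStepA, hidx, hc, hp, tsG]
        · simp only [tsStepA, if_neg hidx, if_neg hc, hy, if_neg hp, tsG, tsAltChar]
          split_ifs <;> rfl
    have hassoc : pre ++ p :: c :: suf = (pre ++ [p]) ++ c :: suf := by simp
    have hlen : ((pre.length : Int) + 1) + 1 = (((pre ++ [p]).length : Nat) : Int) + 1 := by
      simp
    rw [List.foldl_cons, step, hlen, hassoc, ih (pre ++ [p]) (res ++ [tsG p c]) c]
    simp [tsMapPrev]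

-- characterisation of A
lemma tsA_eq (sentence : String) :
    transformSentence sentence
      = String.ofList (match sentence.toList with
          | [] => [] | c :: rest => c :: tsMapPrev c rest) := by
  unfold transformSentence
  cases h : sentence.toList with
  | nil => simp [h]
  | cons c rest =>
    simp only [h]
    show String.ofList ((List.foldl (tsStepA (c :: rest)) ([], 0) (c :: rest)).1)
        = String.ofList (c :: tsMapPrev c rest)
    have h0 : tsStepA (c :: rest) ([], 0) c = ([c], 1) := by simp [tsStepA]
    have hmain := tsLoopA rest [] [c] c
    simp only [List.length_nil, Nat.cast_zero, zero_add, List.nil_append] at hmain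
    simp only [List.foldl_cons, h0]
    rw [hmain]
    simp

lemma splitOn_ne_nil (cs : List Char) : cs.splitOn ' ' ≠ [] :=
  List.splitOnP_ne_nil _ cs

-- intercalate unfolding helpers
lemma ic_head (c : Char) (x : List Char) (l : List (List Char)) :
    [' '].intercalate ((c :: x) :: l) = c :: [' '].intercalate (x :: l) := by
  cases l <;> simp [List.intercalate]

lemma ic_nil_cons (l : List (List Char)) (h : l ≠ []) :
    [' '].intercalate ([] :: l) = ' ' :: [' '].intercalate l := by
  cases l with
  | nil => exact absurd rfl h
  | cons a t => cases t <;> simp [List.intercalate]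

-- transform of a word continuation h whose first char's predecessor is q
def tsCont (q : Char) (h : List Char) : List Char := List.zipWith tsAltChar (q :: h) h

lemma tsCont_cons (q c : Char) (t : List Char) :
    tsCont q (c :: t) = tsAltChar q c :: tsCont c t := by simp [tsCont]

lemma tsAltWord_cons (c : Char) (h : List Char) :
    tsAltWord (c :: h) = c :: tsCont c h := by simp [tsAltWord, tsCont]

-- B's value on cs, and its generalisation where the head word continues a predecessor q
def tsF (cs : List Char) : List Char :=
  [' '].intercalate ((cs.splitOn ' ').map tsAltWord)

def tsFq (q : Char) (cs : List Char) : List Char :=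
  [' '].intercalate (match cs.splitOn ' ' with
    | [] => []
    | h :: t => tsCont q h :: t.map tsAltWord)

-- the split/join ↔ predecessor-scan correspondence, both forms at once
lemma tsMain (cs : List Char) :
    tsF cs = tsMapPrev ' ' cs ∧ ∀ q, q ≠ ' ' → tsFq q cs = tsMapPrev q cs := by
  induction cs with
  | nil =>
    constructor
    · simp [tsF, List.splitOn, List.splitOnP_nil, tsAltWord, List.intercalate, tsMapPrev]
    · intro q _
      simp [tsFq, List.splitOn, List.splitOnP_nil, tsCont, List.intercalate, tsMapPrev]
  | cons c rest ih =>
    obtain ⟨ih1, ih2⟩ := ih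
    obtain ⟨h, t, hht⟩ : ∃ h t, rest.splitOn ' ' = h :: t := by
      cases hr : rest.splitOn ' ' with
      | nil => exact absurd hr (splitOn_ne_nil rest)
      | cons h t => exact ⟨h, t, rfl⟩
    by_cases hc : c = ' '
    · subst hc
      have hsplit : (' ' :: rest).splitOn ' ' = [] :: rest.splitOn ' ' := by
        simp [List.splitOn, List.splitOnP_cons]
      have hne : (rest.splitOn ' ').map tsAltWord ≠ [] := by
        simp [hht]
      have hF : tsF (' ' :: rest) = ' ' :: tsF rest := by
        simp only [tsF, hsplit, List.map_cons, tsAltWord]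
        simpa using ic_nil_cons _ hne
      constructor
      · rw [hF, ih1]
        simp [tsMapPrev, tsG_space_left, tsG_space_right]
      · intro q hq
        have : tsFq q (' ' :: rest) = ' ' :: tsF rest := by
          simp only [tsFq, hsplit, hht, tsCont]
          have := ic_nil_cons (tsAltWord h :: t.map tsAltWord) (by simp)
          simpa [tsF, hht] using this
        rw [this, ih1]
        simp [tsMapPrev, tsG_space_right]
    · have hsplit : (c :: rest).splitOn ' ' = (c :: h) :: t := by
        simp only [List.splitOn] at hht ⊢
        rw [List.splitOnP_cons, hht]
        simp [hc]
      have hF : tsF (c :: rest) = c :: tsFq c rest := by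
        simp only [tsF, hsplit, List.map_cons, tsAltWord_cons, tsFq, hht]
        exact ic_head c (tsCont c h) (t.map tsAltWord)
      have hFq : ∀ q, tsFq q (c :: rest) = tsAltChar q c :: tsFq c rest := by
        intro q
        simp only [tsFq, hsplit, hht, tsCont_cons]
        exact ic_head (tsAltChar q c) (tsCont c h) (t.map tsAltWord)
      constructor
      · rw [hF, ih2 c hc]
        simp [tsMapPrev, tsG_space_left]
      · intro q hq
        rw [hFq q, ih2 c hc]
        simp [tsMapPrev, tsG, hc, hq]

-- ===== VERDICT (by name: the statement is the Claim_ definition above) =====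
theorem transformSentence_spec : Claim_equal_transformSentence := by
  intro sentence _
  unfold Spec_transformSentence transformSentence_alt
  rw [tsA_eq]
  have hF : [' '].intercalate ((sentence.toList.splitOn ' ').map tsAltWord)
      = tsMapPrev ' ' sentence.toList := (tsMain sentence.toList).1
  rw [hF]
  cases h : sentence.toList with
  | nil => simp [tsMapPrev]
  | cons c rest => simp [tsMapPrev, tsG_space_left]
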